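-- pv_equiv track=rewrite | github.com/tymyrddin/scripts-modern-ciphers | rsa/public_key_cipher.py | get_text_from_blocks
-- ===== SOURCE A (Python) =====
-- SYMBOLS = "ABCDEFGHIJKLMNOPQRSTUVWXYZabcdefghijklmnopqrstuvwxyz1234567890 !?."
--
-- def get_text_from_blocks(
--     block_ints: list[int], message_length: int, blocksize: int
-- ) -> str:
--     # Converts a list of block integers to the original message string.
--     # The original message length is needed to properly convert the last
--     # block integer.
--     message: list[str] = []
--     for block_int in block_ints:
--         block_message: list[str] = []
--         for i in range(blocksize - 1, -1, -1):
--             if len(message) + i < message_length: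
--                 # Decode the message string for the 128 (or whatever
--                 # blocksize is set to) characters from this block integer:
--                 character_index = block_int // (len(SYMBOLS) ** i)
--                 block_int = block_int % (len(SYMBOLS) ** i)
--                 block_message.insert(0, SYMBOLS[character_index])
--         message.extend(block_message)
--     return "".join(message)
-- ===== SOURCE B (Python) =====
-- SYMBOLS = "ABCDEFGHIJKLMNOPQRSTUVWXYZabcdefghijklmnopqrstuvwxyz1234567890 !?."
--
-- def get_text_from_blocks(
--     block_ints: list[int], message_length: int, blocksize: int
-- ) -> str:
--     # One pass of repeated divmod per block: each step peels off the lowest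
--     # base-66 digit, so no powers of the base are ever recomputed.
--     base = len(SYMBOLS)
--     chars: list[str] = []
--     pos = 0
--     for b in block_ints:
--         take = min(blocksize, message_length - pos)
--         if take > 0:
--             for _ in range(take - 1):
--                 b, d = divmod(b, base)
--                 chars.append(SYMBOLS[d])
--             chars.append(SYMBOLS[b])
--             pos += take
--     return "".join(chars)
-- ===== Notes on version B (the rewrite author's own statement) =====
-- stated objective: faster
-- what changed: Per block, B extracts characters by repeated divmod by the base (one division per character, lowest digit first, with a running position counter) instead of A's per-position recomputation of len(SYMBOLS)**i and big-power floordiv/mod inside a reversed range loop.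
import Mathlib
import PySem

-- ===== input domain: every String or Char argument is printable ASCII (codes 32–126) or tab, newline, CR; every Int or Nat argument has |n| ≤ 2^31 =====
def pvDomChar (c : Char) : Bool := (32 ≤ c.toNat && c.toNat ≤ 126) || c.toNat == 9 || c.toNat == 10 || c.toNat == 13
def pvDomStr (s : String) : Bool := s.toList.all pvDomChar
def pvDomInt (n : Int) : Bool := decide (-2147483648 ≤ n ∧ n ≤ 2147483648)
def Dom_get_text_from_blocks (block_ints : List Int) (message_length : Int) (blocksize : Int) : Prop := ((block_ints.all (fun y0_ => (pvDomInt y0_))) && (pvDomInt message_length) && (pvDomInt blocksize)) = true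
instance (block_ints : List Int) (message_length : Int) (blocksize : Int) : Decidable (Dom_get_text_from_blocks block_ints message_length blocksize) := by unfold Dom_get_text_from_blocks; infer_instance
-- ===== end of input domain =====

-- B replaces A's per-position recomputation of len(SYMBOLS)**i (and big power division)
-- by one repeated-divmod pass per block; proved to return A's exact value on Pre_.

-- ===== PORT A =====
def SYMBOLS_L : List Char := "ABCDEFGHIJKLMNOPQRSTUVWXYZabcdefghijklmnopqrstuvwxyz1234567890 !?.".toList

def symCount : Int := (SYMBOLS_L.length : Int)   -- len(SYMBOLS) = 66

-- inner loop of A: counter n+1 means Python's i = n (range(blocksize-1, -1, -1));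
-- SYMBOLS[character_index] is pyGet? (none = IndexError, excluded by Pre_)
def innerA (ml pos : Int) : Nat → Int → List Char → Option (Int × List Char)
  | 0, b, bm => some (b, bm)
  | n+1, b, bm =>
    if pos + (n : Int) < ml then
      match PySem.List.pyGet? SYMBOLS_L (PySem.Int.floordiv b (symCount ^ n)) with
      | some c => innerA ml pos n (PySem.Int.mod b (symCount ^ n)) (c :: bm)
      | none => none
    else innerA ml pos n b bm

def outerA (ml bs : Int) : List Int → List Char → Option (List Char)
  | [], msg => some msg
  | b :: rest, msg =>
    match innerA ml (msg.length : Int) bs.toNat b [] with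
    | some (_, bm) => outerA ml bs rest (msg ++ bm)
    | none => none

def get_text_from_blocks (block_ints : List Int) (message_length : Int) (blocksize : Int) : String :=
  match outerA message_length blocksize block_ints [] with
  | some cs => String.ofList cs
  | none => ""   -- unreachable under Pre_ (Python A raises IndexError exactly there)

-- ===== PORT B =====
-- b, d = divmod(b, base); chars.append(SYMBOLS[d])  — repeated divmod, lowest digit first
def innerB : Nat → Int → List Char → Option (Int × List Char)
  | 0, b, ds => some (b, ds)
  | n+1, b, ds =>
    match PySem.List.pyGet? SYMBOLS_L (PySem.Int.mod b symCount) with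
    | some c => innerB n (PySem.Int.floordiv b symCount) (ds ++ [c])
    | none => none

def outerB (ml bs : Int) : List Int → Int → List Char → Option (List Char)
  | [], _, out => some out
  | b :: rest, pos, out =>
    let take := min bs (ml - pos)
    if 0 < take then
      match innerB (take - 1).toNat b [] with
      | some (bf, ds) =>
        match PySem.List.pyGet? SYMBOLS_L bf with
        | some c => outerB ml bs rest (pos + take) (out ++ (ds ++ [c]))
        | none => none
      | none => none
    else outerB ml bs rest pos out

def get_text_from_blocks_alt (block_ints : List Int) (message_length : Int) (blocksize : Int) : String :=
  match outerB message_length blocksize block_ints 0 [] with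
  | some cs => String.ofList cs
  | none => ""   -- unreachable under Pre_ (Python B raises IndexError exactly there)

-- ===== PRECONDITION & SPEC =====
-- Pre_ excludes exactly the inputs on which Python A raises IndexError: the k-th block
-- decodes t(k) = max 0 (min blocksize (message_length - k*blocksize)) characters, and its
-- top character index block_ints[k] // 66^(t-1) must lie in [-66, 66) (Python wraps
-- negative string indices ≥ -66); equivalently -66^t ≤ block_ints[k] < 66^t.
def Pre_get_text_from_blocks (block_ints : List Int) (message_length : Int) (blocksize : Int) : Prop :=
  ∀ k, k < block_ints.length →
    (max 0 (min blocksize (message_length - (k : Int) * blocksize)) = 0 ∨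
      (-(symCount ^ (max 0 (min blocksize (message_length - (k : Int) * blocksize))).toNat) ≤ block_ints.getD k 0 ∧
        block_ints.getD k 0 < symCount ^ (max 0 (min blocksize (message_length - (k : Int) * blocksize))).toNat))

instance (block_ints : List Int) (message_length : Int) (blocksize : Int) : Decidable (Pre_get_text_from_blocks block_ints message_length blocksize) := by unfold Pre_get_text_from_blocks; infer_instance

def pvWitness_get_text_from_blocks : List Int × Int × Int := ([5, 6], 3, 2)

def Spec_get_text_from_blocks (block_ints : List Int) (message_length : Int) (blocksize : Int) (out : String) : Prop := out = get_text_from_blocks_alt block_ints message_length blocksize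
instance (block_ints : List Int) (message_length : Int) (blocksize : Int) (out : String) : Decidable (Spec_get_text_from_blocks block_ints message_length blocksize out) := by unfold Spec_get_text_from_blocks; infer_instance

-- ===== CLAIM (what is proved, stated in full; the proofs are below) =====
def Claim_equal_get_text_from_blocks : Prop := ∀ (block_ints : List Int) (message_length : Int) (blocksize : Int), Dom_get_text_from_blocks block_ints message_length blocksize → Pre_get_text_from_blocks block_ints message_length blocksize → Spec_get_text_from_blocks block_ints message_length blocksize (get_text_from_blocks block_ints message_length blocksize)

-- ===== LEMMAS AND PROOFS =====

theorem symCount_eq : symCount = 66 := by decide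
theorem symLen_eq : SYMBOLS_L.length = 66 := by decide

theorem emod_mul_ediv (a p q : Int) (hp : 0 < p) (hq : 0 < q) : (a % (p*q)) / p = (a / p) % q := by
  have hpq : 0 < p*q := mul_pos hp hq
  have hr0 : 0 ≤ a % (p*q) := Int.emod_nonneg a (ne_of_gt hpq)
  have hrlt : a % (p*q) < p*q := Int.emod_lt_of_pos a hpq
  have ha : a = a % (p*q) + (a/(p*q)*q)*p := by
    have := Int.mul_ediv_add_emod a (p*q); linarith [this]
  conv_rhs => rw [ha]
  rw [Int.add_mul_ediv_right _ _ (ne_of_gt hp), Int.add_mul_emod_self_right]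
  rw [Int.emod_eq_of_lt (Int.ediv_nonneg hr0 (le_of_lt hp)) ((Int.ediv_lt_iff_lt_mul hp).mpr (by linarith))]

-- common spec of one block's character chunk: the low n base-66 digits of b (as SYMBOLS
-- characters, lowest first) followed by SYMBOLS[b // 66^n] (the only possibly-failing lookup)
def dig (b : Int) : Nat → Option (List Char)
  | 0 => (PySem.List.pyGet? SYMBOLS_L b).map (fun c => [c])
  | n+1 =>
    match PySem.List.pyGet? SYMBOLS_L (PySem.Int.mod b 66) with
    | some c => (dig (PySem.Int.floordiv b 66) n).map (fun l => c :: l)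
    | none => none

theorem dig_length (b : Int) (n : Nat) (l : List Char) (h : dig b n = some l) : l.length = n + 1 := by
  induction n generalizing b l with
  | zero =>
    simp only [dig, Option.map_eq_some_iff] at h
    obtain ⟨c, _, rfl⟩ := h; rfl
  | succ n ih =>
    simp only [dig] at h
    cases hg : PySem.List.pyGet? SYMBOLS_L (PySem.Int.mod b 66) with
    | none => rw [hg] at h; simp at h
    | some c =>
      rw [hg] at h
      simp only [Option.map_eq_some_iff] at h
      obtain ⟨l', hl', rfl⟩ := h
      simp [ih _ _ hl']

theorem pyGet?_total (i : Int) (h0 : -66 ≤ i) (h1 : i < 66) : ∃ c, PySem.List.pyGet? SYMBOLS_L i = some c := by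
  cases hg : PySem.List.pyGet? SYMBOLS_L i with
  | some c => exact ⟨c, rfl⟩
  | none =>
    rw [PySem.List.pyGet?_eq_none_iff] at hg
    exact absurd (by constructor <;> simp [symLen_eq] <;> omega) hg

-- mod by a positive power is always a valid index source for the next digit
theorem mod_pow_nonneg (b : Int) (n : Nat) : 0 ≤ PySem.Int.mod b ((66:Int)^n) ∧ PySem.Int.mod b ((66:Int)^n) < (66:Int)^n := by
  have hp : (0:Int) < 66^n := by positivity
  rw [PySem.Int.mod_eq_emod_of_pos hp]
  exact ⟨Int.emod_nonneg b (ne_of_gt hp), Int.emod_lt_of_pos b hp⟩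

-- peeling the TOP digit of dig instead of the bottom one
theorem dig_top (n : Nat) (b : Int) :
    dig b (n+1) =
      match PySem.List.pyGet? SYMBOLS_L (PySem.Int.floordiv b ((66:Int)^(n+1))) with
      | some c => (dig (PySem.Int.mod b ((66:Int)^(n+1))) n).map (fun l => l ++ [c])
      | none => none := by
  induction n generalizing b with
  | zero =>
    have hp : (0:Int) < 66 := by norm_num
    have hddv : PySem.Int.floordiv b ((66:Int)^(0+1)) = b / 66 := by
      rw [zero_add, pow_one, PySem.Int.floordiv_eq_ediv_of_pos hp]
    have hmodv : PySem.Int.mod b ((66:Int)^(0+1)) = b % 66 := by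
      rw [zero_add, pow_one, PySem.Int.mod_eq_emod_of_pos hp]
    have hmm : PySem.Int.mod (b % 66) 66 = b % 66 := by
      rw [PySem.Int.mod_eq_emod_of_pos hp, Int.emod_emod_of_dvd _ dvd_rfl]
    have hdd : PySem.Int.floordiv (b % 66) 66 = 0 := by
      rw [PySem.Int.floordiv_eq_ediv_of_pos hp]
      exact Int.ediv_eq_zero_of_lt (Int.emod_nonneg b (by norm_num)) (Int.emod_lt_of_pos b hp)
    simp only [dig, hddv, hmodv, PySem.Int.mod_eq_emod_of_pos hp,
      PySem.Int.floordiv_eq_ediv_of_pos hp]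
    cases PySem.List.pyGet? SYMBOLS_L (b % 66) <;>
      cases PySem.List.pyGet? SYMBOLS_L (b / 66) <;> simp
  | succ n ih =>
    have hp : (0:Int) < 66 := by norm_num
    have hpn : (0:Int) < 66^(n+1) := by positivity
    -- unfold one bottom step on both sides
    conv_lhs => rw [dig]
    have hmod : PySem.Int.mod (PySem.Int.mod b ((66:Int)^(n+2))) 66 = PySem.Int.mod b 66 := by
      rw [PySem.Int.mod_eq_emod_of_pos hp, PySem.Int.mod_eq_emod_of_pos hp,
        PySem.Int.mod_eq_emod_of_pos (show (0:Int) < 66^(n+2) by positivity)]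
      exact Int.emod_emod_of_dvd _ (dvd_pow_self 66 (Nat.succ_ne_zero (n+1)))
    have hdivdiv : PySem.Int.floordiv (PySem.Int.floordiv b 66) ((66:Int)^(n+1)) = PySem.Int.floordiv b ((66:Int)^(n+2)) := by
      rw [PySem.Int.floordiv_eq_ediv_of_pos hp, PySem.Int.floordiv_eq_ediv_of_pos hpn,
        PySem.Int.floordiv_eq_ediv_of_pos (by positivity)]
      rw [Int.ediv_ediv_of_nonneg (by norm_num)]
      norm_num [pow_succ, mul_comm]
    have hmoddiv : PySem.Int.floordiv (PySem.Int.mod b ((66:Int)^(n+2))) 66 = PySem.Int.mod (PySem.Int.floordiv b 66) ((66:Int)^(n+1)) := by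
      rw [PySem.Int.floordiv_eq_ediv_of_pos hp, PySem.Int.floordiv_eq_ediv_of_pos hp,
        PySem.Int.mod_eq_emod_of_pos (by positivity), PySem.Int.mod_eq_emod_of_pos hpn]
      have : ((66:Int)^(n+2)) = 66 * 66^(n+1) := by ring
      rw [this]
      exact emod_mul_ediv b 66 (66^(n+1)) hp hpn
    cases hc : PySem.List.pyGet? SYMBOLS_L (PySem.Int.mod b 66) with
    | none =>
      cases hT : PySem.List.pyGet? SYMBOLS_L (PySem.Int.floordiv b ((66:Int)^(n+2))) with
      | none => rfl
      | some cT =>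
        simp only [dig, hmod, hc]; rfl
    | some c =>
      rw [ih (PySem.Int.floordiv b 66), hdivdiv]
      cases hT : PySem.List.pyGet? SYMBOLS_L (PySem.Int.floordiv b ((66:Int)^(n+2))) with
      | none => rfl
      | some cT =>
        simp only [dig, hmod, hc, hmoddiv]
        cases dig (PySem.Int.floordiv (PySem.Int.mod (PySem.Int.floordiv b 66) ((66:Int)^(n+1))) 66) n <;> simp [Function.comp_def]

-- B's per-block computation equals dig
theorem innerB_eq (n : Nat) : ∀ (b : Int) (ds : List Char),
    (match innerB n b ds with
      | some (bf, ds') => (PySem.List.pyGet? SYMBOLS_L bf).map (fun c => ds' ++ [c])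
      | none => none)
      = (dig b n).map (fun l => ds ++ l) := by
  induction n with
  | zero =>
    intro b ds
    simp only [innerB, dig]
    cases PySem.List.pyGet? SYMBOLS_L b <;> rfl
  | succ n ih =>
    intro b ds
    simp only [innerB, dig, symCount_eq]
    cases PySem.List.pyGet? SYMBOLS_L (PySem.Int.mod b 66) with
    | none => rfl
    | some c =>
      rw [ih (PySem.Int.floordiv b 66) (ds ++ [c])]
      cases dig (PySem.Int.floordiv b 66) n <;> simp

-- A's inner loop, fully decoding phase, equals dig
theorem innerA_eq (ml pos : Int) (n : Nat) : ∀ (b : Int) (bm : List Char),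
    (∀ i : Nat, i ≤ n → pos + (i : Int) < ml) →
    -((66:Int)^(n+1)) ≤ b → b < (66:Int)^(n+1) →
    innerA ml pos (n+1) b bm = (dig b n).map (fun l => (0, l ++ bm)) := by
  induction n with
  | zero =>
    intro b bm hcond hb0 hb1
    have h : pos < ml := by simpa using hcond 0 (le_refl 0)
    have hdiv1 : PySem.Int.floordiv b (symCount ^ 0) = b := by
      simp [symCount_eq]
    have hmod1 : PySem.Int.mod b (symCount ^ 0) = 0 := by
      simp [symCount_eq]
    simp only [innerA, dig, Nat.cast_zero, add_zero, if_pos h, hdiv1, hmod1]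
    cases PySem.List.pyGet? SYMBOLS_L b <;> simp
  | succ n ih =>
    intro b bm hcond hb0 hb1
    have h := hcond (n+1) (le_refl _)
    have hpn : (0:Int) < 66^(n+1) := by positivity
    have hidx0 : -66 ≤ PySem.Int.floordiv b (symCount ^ (n+1)) := by
      rw [symCount_eq, PySem.Int.floordiv_eq_ediv_of_pos hpn, Int.le_ediv_iff_mul_le hpn]
      calc (-66) * 66^(n+1) = -(66^(n+2)) := by ring
        _ ≤ b := hb0
    have hidx1 : PySem.Int.floordiv b (symCount ^ (n+1)) < 66 := by
      rw [symCount_eq, PySem.Int.floordiv_eq_ediv_of_pos hpn, Int.ediv_lt_iff_lt_mul hpn]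
      calc b < 66^(n+2) := hb1
        _ = 66 * 66^(n+1) := by ring
    obtain ⟨cT, hcT⟩ := pyGet?_total _ hidx0 hidx1
    conv_lhs => rw [innerA]
    rw [if_pos (show pos + ((n+1 : Nat) : Int) < ml from by exact_mod_cast h), hcT]
    show innerA ml pos (n+1) (PySem.Int.mod b (symCount ^ (n+1))) (cT :: bm) = _
    have hb' := mod_pow_nonneg b (n+1)
    rw [ih (PySem.Int.mod b (symCount ^ (n+1))) (cT :: bm)
        (fun i hi => hcond i (Nat.le_succ_of_le hi))
        (by rw [symCount_eq]; exact le_trans (neg_nonpos_of_nonneg (by positivity)) hb'.1)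
        (by rw [symCount_eq]; exact hb'.2)]
    rw [dig_top n b]
    rw [symCount_eq] at hcT
    rw [hcT]
    simp only [symCount_eq]
    cases dig (PySem.Int.mod b ((66:Int)^(n+1))) n <;> simp

-- A's inner loop skips every position i with ml ≤ pos + i
theorem innerA_skip (ml pos : Int) (t0 : Nat) : ∀ (m : Nat) (b : Int) (bm : List Char), t0 ≤ m →
    (∀ i : Nat, t0 ≤ i → i < m → ml ≤ pos + (i : Int)) →
    innerA ml pos m b bm = innerA ml pos t0 b bm := by
  intro m
  induction m with
  | zero => intro b bm h _; rw [Nat.le_zero.mp h]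
  | succ m ih =>
    intro b bm h hskip
    rcases Nat.lt_or_ge t0 (m+1) with hlt | hge
    · have hm : ml ≤ pos + (m : Int) := hskip m (Nat.lt_succ_iff.mp hlt) (Nat.lt_succ_self m)
      have hnot : ¬ (pos + (m : Int) < ml) := by omega
      rw [innerA, if_neg hnot]
      exact ih b bm (Nat.lt_succ_iff.mp hlt) (fun i hi him => hskip i hi (Nat.lt_succ_of_lt him))
    · rw [Nat.le_antisymm h hge]

-- accumulator lemma for outerB
theorem outerB_acc (ml bs : Int) : ∀ (bl : List Int) (pos : Int) (out : List Char),
    outerB ml bs bl pos out = (outerB ml bs bl pos []).map (fun z => out ++ z) := by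
  intro bl
  induction bl with
  | nil => intro pos out; simp [outerB]
  | cons b rest ih =>
    intro pos out
    simp only [outerB]
    split
    · cases innerB (min bs (ml - pos) - 1).toNat b [] with
      | none => rfl
      | some p =>
        obtain ⟨bf, ds⟩ := p
        show (match PySem.List.pyGet? SYMBOLS_L bf with
            | some c => outerB ml bs rest (pos + min bs (ml - pos)) (out ++ (ds ++ [c]))
            | none => none)
          = Option.map (fun z => out ++ z)
            (match PySem.List.pyGet? SYMBOLS_L bf with
            | some c => outerB ml bs rest (pos + min bs (ml - pos)) ([] ++ (ds ++ [c]))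
            | none => none)
        cases PySem.List.pyGet? SYMBOLS_L bf with
        | none => rfl
        | some c =>
          show outerB ml bs rest (pos + min bs (ml - pos)) (out ++ (ds ++ [c]))
            = Option.map (fun z => out ++ z) (outerB ml bs rest (pos + min bs (ml - pos)) ([] ++ (ds ++ [c])))
          rw [ih (pos + min bs (ml - pos)) (out ++ (ds ++ [c])), ih (pos + min bs (ml - pos)) ([] ++ (ds ++ [c]))]
          cases outerB ml bs rest (pos + min bs (ml - pos)) [] <;> simp
    · exact ih pos out

-- main induction: A's outer loop vs B's outer loop
theorem outer_eq (ml bs : Int) : ∀ (bl : List Int) (pos : Int) (msg : List Char),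
    pos = (msg.length : Int) →
    (∀ k, k < bl.length →
      (max 0 (min bs (ml - pos - (k : Int) * bs)) = 0 ∨
        (-(symCount ^ (max 0 (min bs (ml - pos - (k : Int) * bs))).toNat) ≤ bl.getD k 0 ∧
          bl.getD k 0 < symCount ^ (max 0 (min bs (ml - pos - (k : Int) * bs))).toNat))) →
    outerA ml bs bl msg = (outerB ml bs bl pos []).map (fun z => msg ++ z) := by
  intro bl
  induction bl with
  | nil => intro pos msg _ _; simp [outerA, outerB]
  | cons b rest ih =>
    intro pos msg hpos hpre
    simp only [outerA, outerB]
    by_cases htake : 0 < min bs (ml - pos)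
    · -- decoding block
      set take := min bs (ml - pos) with htakedef
      have hbs : 0 < bs := lt_of_lt_of_le htake (min_le_left _ _)
      have hml : 0 < ml - pos := lt_of_lt_of_le htake (min_le_right _ _)
      have h0 := hpre 0 (Nat.succ_pos _)
      simp only [Nat.cast_zero, zero_mul, sub_zero, List.getD_cons_zero] at h0
      have hT0 : max 0 (min bs (ml - pos)) = take := by omega
      rw [hT0] at h0
      have hb : -(symCount ^ take.toNat) ≤ b ∧ b < symCount ^ take.toNat := by
        rcases h0 with h | h
        · omega
        · exact h
      -- A: skip phase down to take.toNat, then decode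
      have hskip : innerA ml (msg.length : Int) bs.toNat b [] = innerA ml (msg.length : Int) take.toNat b [] := by
        apply innerA_skip
        · omega
        · intro i hi him
          have h1 : take ≤ (i : Int) := by
            have : (take.toNat : Int) = take := Int.toNat_of_nonneg (le_of_lt htake)
            omega
          have h2 : (i : Int) < bs := by
            have : ((bs.toNat : Int)) = bs := Int.toNat_of_nonneg (le_of_lt hbs)
            omega
          -- take < bs would force take = ml - pos
          have h3 : take = ml - pos := by
            rcases min_cases bs (ml - pos) with ⟨he, hle⟩ | ⟨he, hle⟩
            · rw [htakedef, he]; omega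
            · rw [htakedef, he]
          rw [← hpos]; omega
      rw [hskip]
      obtain ⟨t', ht'⟩ : ∃ t', take.toNat = t' + 1 := ⟨take.toNat - 1, by omega⟩
      have ht'2 : (take - 1).toNat = t' := by omega
      have hcond : ∀ i : Nat, i ≤ t' → (msg.length : Int) + (i : Int) < ml := by
        intro i hi
        have : (i : Int) ≤ t' := by exact_mod_cast hi
        have : (i : Int) < take := by omega
        have : take ≤ ml - pos := min_le_right _ _
        omega
      rw [ht']
      rw [innerA_eq ml (msg.length : Int) t' b [] hcond
          (by rw [symCount_eq] at hb; rw [← ht']; exact hb.1)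
          (by rw [symCount_eq] at hb; rw [← ht']; exact hb.2)]
      rw [if_pos htake, ht'2]
      have hB := innerB_eq t' b []
      cases hin : innerB t' b [] with
      | none =>
        rw [hin] at hB
        cases hdig : dig b t' with
        | some l => rw [hdig] at hB; simp at hB
        | none => simp
      | some p =>
        obtain ⟨bf, ds⟩ := p
        rw [hin] at hB
        dsimp only at hB ⊢
        cases hgT : PySem.List.pyGet? SYMBOLS_L bf with
        | none =>
          rw [hgT] at hB
          cases hdig : dig b t' with
          | some l => rw [hdig] at hB; simp at hB
          | none => simp
        | some c =>
          rw [hgT] at hB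
          cases hdig : dig b t' with
          | none => rw [hdig] at hB; simp at hB
          | some l =>
            rw [hdig] at hB
            simp only [Option.map_some, Option.some.injEq, List.nil_append] at hB
            simp only [Option.map_some]
            have hlen : l.length = t' + 1 := dig_length b t' l hdig
            have hmsg' : pos + take = ((msg ++ (l ++ [])).length : Int) := by
              simp [hlen, hpos]; omega
            rw [ih (pos + take) (msg ++ (l ++ [])) hmsg' ?_]
            · rw [outerB_acc ml bs rest (pos + take) ([] ++ (ds ++ [c]))]
              cases outerB ml bs rest (pos + take) [] <;> simp [hB]
            · -- precondition for the tail
              intro k hk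
              have hko := hpre (k+1) (by simpa using Nat.succ_lt_succ hk)
              simp only [List.getD_cons_succ] at hko
              by_cases hfull : take = bs
              · have harg : ml - (pos + take) - (k : Int) * bs = ml - pos - ((k : Int) + 1) * bs := by
                  rw [hfull]; ring
                rw [harg]
                exact_mod_cast hko
              · -- short final block: everything afterwards decodes 0 characters
                left
                have h3 : take = ml - pos := by
                  rcases min_cases bs (ml - pos) with ⟨he, _⟩ | ⟨he, _⟩
                  · exact absurd he hfull
                  · exact he
                have hk0 : (0:Int) ≤ (k : Int) * bs := mul_nonneg (by positivity) (le_of_lt hbs)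
                omega
    · -- skipped block: A decodes nothing, B skips
      have hskip : innerA ml (msg.length : Int) bs.toNat b [] = innerA ml (msg.length : Int) 0 b [] := by
        apply innerA_skip
        · exact Nat.zero_le _
        · intro i _ him
          have hbs_or : bs ≤ 0 ∨ ml - pos ≤ 0 := by
            rcases min_cases bs (ml - pos) with ⟨he, _⟩ | ⟨he, _⟩ <;> omega
          rcases hbs_or with hbs | hml
          · exact absurd him (by omega)
          · have : (0:Int) ≤ (i : Int) := by positivity
            rw [← hpos]; omega
      rw [hskip, if_neg htake]
      simp only [innerA, List.append_nil]
      refine ih pos msg hpos ?_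
      -- precondition for the tail (pos unchanged)
      intro k hk
      have hko := hpre (k+1) (by simpa using Nat.succ_lt_succ hk)
      simp only [List.getD_cons_succ] at hko
      left
      rcases le_or_gt bs 0 with hbs | hbs
      · have : min bs (ml - pos - (k : Int) * bs) ≤ bs := min_le_left _ _
        omega
      · have hml : ml - pos ≤ 0 := by
          rcases min_cases bs (ml - pos) with ⟨he, _⟩ | ⟨he, _⟩ <;> omega
        have hk0 : (0:Int) ≤ (k : Int) * bs := mul_nonneg (by positivity) (le_of_lt hbs)
        have : min bs (ml - pos - (k : Int) * bs) ≤ ml - pos - (k : Int) * bs := min_le_right _ _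
        omega

-- ===== VERDICT (by name: the statement is the Claim_ definition above) =====
theorem get_text_from_blocks_spec : Claim_equal_get_text_from_blocks := by
  intro bl ml bs _ hpre
  unfold Spec_get_text_from_blocks get_text_from_blocks get_text_from_blocks_alt
  have h := outer_eq ml bs bl 0 [] (by simp) ?_
  · rw [h]
    cases outerB ml bs bl 0 [] <;> simp
  · intro k hk
    have := hpre k hk
    simpa using this
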